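-- pv_equiv track=rewrite | github.com/pellevseth/adventofcode | functions/aoc25_d3.py | parse_joltstring_extended
-- ===== SOURCE A (Python) =====
-- from copy import deepcopy
--
-- def parse_joltstring_extended(s, N):
--     """
--     s - string to parse
--     N - number length of sub-string
--     """
--
--     len_s = len(s)
--
--     # Holder track på hvor langt i s man ha kommet
--     sub_string = ''
--
--     s2 = deepcopy(s)
--     len_s2 = len(s2)
--
--     # Plassering i den nye strengen vår
--     for n in range(N):
--
--
--         # Sjekker ulike første siffer
--         for n0 in map(str, list(reversed(range(10)))):
--             idx = s2.find(n0)
--             n_a = 2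
--             if (idx > 0) and (n + len_s2 - idx - 1 == N):
--                 s2 = s2[idx+1:]
--                 len_s2 = len(s2)
--                 sub_string = sub_string + n0
--                 break
--
--     return sub_string
-- ===== SOURCE B (Python) =====
-- def parse_joltstring_extended(s, N):
--     # For step n, A's inner digit loop can only succeed at the single
--     # determined index p = len(s2) + n - N - 1: check that char directly.
--     sub = []
--     s2 = s
--     for n in range(N):
--         p = len(s2) + n - N - 1
--         if p > 0:
--             c = s2[p]
--             if c.isdigit() and c not in s2[:p]:
--                 sub.append(c)
--                 s2 = s2[p+1:]
--     return ''.join(sub)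
-- ===== Notes on version B (the rewrite author's own statement) =====
-- stated objective: simpler
-- what changed: B computes the single index p = len(s2)+n-N-1 that A's branch condition determines and checks that one character directly (digit, not occurring earlier), removing A's per-step scan of s.find over all ten digit strings and the pointless deepcopy.
import Mathlib
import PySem

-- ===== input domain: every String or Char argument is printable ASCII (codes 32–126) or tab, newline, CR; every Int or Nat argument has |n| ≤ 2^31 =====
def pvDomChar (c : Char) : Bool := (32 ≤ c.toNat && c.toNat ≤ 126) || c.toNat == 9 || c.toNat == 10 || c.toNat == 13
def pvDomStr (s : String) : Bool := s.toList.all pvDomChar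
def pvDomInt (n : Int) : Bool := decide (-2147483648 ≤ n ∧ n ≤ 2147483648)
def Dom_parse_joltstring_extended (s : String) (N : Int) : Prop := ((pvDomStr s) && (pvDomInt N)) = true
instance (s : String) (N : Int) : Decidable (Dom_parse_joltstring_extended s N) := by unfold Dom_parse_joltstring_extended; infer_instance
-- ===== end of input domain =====

-- B replaces A's 10-digit find-scan per step by a direct check of the single
-- determined index p = len(s2)+n-N-1 (objective: simpler, constant-factor cheaper).


-- ===== PORT A =====
-- map(str, list(reversed(range(10)))) = ['9',…,'0'] (each a one-char string)
def pjeDigits : List Char := ['9', '8', '7', '6', '5', '4', '3', '2', '1', '0']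

-- A's inner 'for n0 in …: … break' loop over the digit strings
def pjeInnerA (N n : Int) : List Char → List Char × List Char → List Char × List Char
  | [], st => st
  | d :: ds, (s2, sub) =>
    let idx := PySem.Chars.find s2 [d]
    if 0 < idx ∧ n + (s2.length : Int) - idx - 1 = N then
      (PySem.List.slice s2 (some (idx + 1)) none, sub ++ [d])
    else pjeInnerA N n ds (s2, sub)

def parse_joltstring_extended (s : String) (N : Int) : String :=
  let r := (PySem.List.pyRange 0 N 1).foldl (fun st n => pjeInnerA N n pjeDigits st) (s.toList, ([] : List Char))
  String.ofList r.2

-- ===== PORT B =====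
-- B's loop body: check the single determined position p directly
def pjeStepB (N : Int) (st : List Char × List Char) (n : Int) : List Char × List Char :=
  let s2 := st.1
  let p : Int := (s2.length : Int) + n - N - 1
  if 0 < p then
    match PySem.List.pyGet? s2 p with
    | some c =>
      if PySem.Chars.isdigit c ∧ ¬ PySem.Chars.isIn [c] (PySem.List.slice s2 none (some p)) then
        (PySem.List.slice s2 (some (p + 1)) none, st.2 ++ [c])
      else st
    | none => st
  else st

def parse_joltstring_extended_alt (s : String) (N : Int) : String :=
  let r := (PySem.List.pyRange 0 N 1).foldl (pjeStepB N) (s.toList, ([] : List Char))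
  String.ofList r.2

-- ===== PRECONDITION & SPEC =====
def Spec_parse_joltstring_extended (s : String) (N : Int) (out : String) : Prop := out = parse_joltstring_extended_alt s N
instance (s : String) (N : Int) (out : String) : Decidable (Spec_parse_joltstring_extended s N out) := by unfold Spec_parse_joltstring_extended; infer_instance

-- ===== CLAIM (what is proved, stated in full; the proofs are below) =====
def Claim_equal_parse_joltstring_extended : Prop := ∀ (s : String) (N : Int), Dom_parse_joltstring_extended s N → Spec_parse_joltstring_extended s N (parse_joltstring_extended s N)

-- ===== LEMMAS AND PROOFS =====

theorem pje_prefix_singleton (l : List Char) (c : Char) : ([c] <+: l) ↔ l.head? = some c := by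
  cases l <;> simp [List.cons_prefix_cons, eq_comm]

-- find of a one-char needle: first index holding that char
theorem pje_find_single_eq_iff (t : List Char) (d : Char) (p : Nat) :
    PySem.Chars.find t [d] = (p : Int) ↔ t[p]? = some d ∧ ∀ i < p, t[i]? ≠ some d := by
  constructor
  · intro h
    have h0 : 0 ≤ PySem.Chars.find t [d] := by omega
    obtain ⟨h1, h2⟩ := PySem.Chars.find_spec h0
    rw [h] at h1 h2
    simp only [Int.toNat_natCast] at h1 h2
    refine ⟨?_, fun i hi => ?_⟩
    · rw [← List.head?_drop]; exact (pje_prefix_singleton _ _).mp h1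
    · intro hc
      exact h2 i hi ((pje_prefix_singleton _ _).mpr (by rw [List.head?_drop]; exact hc))
  · rintro ⟨h1, h2⟩
    have hinf : [d] <:+: t := by
      rw [List.singleton_infix_iff]; exact List.mem_of_getElem? h1
    have hne : PySem.Chars.find t [d] ≠ -1 := (PySem.Chars.find_ne_neg_one_iff t [d]).mpr hinf
    have h0 : 0 ≤ PySem.Chars.find t [d] := by
      have := PySem.Chars.neg_one_le_find t [d]; omega
    obtain ⟨hpre, hmin⟩ := PySem.Chars.find_spec h0
    set q := (PySem.Chars.find t [d]).toNat with hq
    have hfq : PySem.Chars.find t [d] = (q : Int) := by omega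
    have hqd : t[q]? = some d := by
      rw [← List.head?_drop]; exact (pje_prefix_singleton _ _).mp hpre
    rcases lt_trichotomy q p with hlt | heq | hgt
    · exact absurd hqd (h2 q hlt)
    · rw [hfq, heq]
    · exact absurd ((pje_prefix_singleton _ _).mpr (by rw [List.head?_drop]; exact h1)) (hmin p hgt)

theorem pje_isIn_single (c : Char) (l : List Char) :
    PySem.Chars.isIn [c] l = true ↔ c ∈ l := by
  rw [PySem.Chars.isIn_iff_infix, List.singleton_infix_iff]

theorem pje_mem_digits (c : Char) : c ∈ pjeDigits ↔ PySem.Chars.isdigit c = true := by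
  constructor
  · intro h; fin_cases h <;> decide
  · intro h
    simp only [PySem.Chars.isdigit, Bool.and_eq_true, decide_eq_true_eq] at h
    obtain ⟨h1, h2⟩ := h
    rw [Char.le_def] at h1 h2
    have hb1 : 48 ≤ c.toNat := UInt32.le_iff_toNat_le.mp h1
    have hb2 : c.toNat ≤ 57 := UInt32.le_iff_toNat_le.mp h2
    rw [show c = Char.ofNat c.toNat from (Char.ofNat_toNat c).symm]
    unfold pjeDigits
    interval_cases c.toNat <;> decide

-- the success condition of A's inner-loop branch for digit d
def pjeCond (N n : Int) (s2 : List Char) (d : Char) : Prop :=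
  0 < PySem.Chars.find s2 [d] ∧ n + (s2.length : Int) - PySem.Chars.find s2 [d] - 1 = N

theorem pjeInnerA_no_hit (N n : Int) (s2 sub : List Char) (ds : List Char)
    (h : ∀ d ∈ ds, ¬ pjeCond N n s2 d) :
    pjeInnerA N n ds (s2, sub) = (s2, sub) := by
  induction ds with
  | nil => rfl
  | cons d ds ih =>
    have hd := h d (List.mem_cons_self)
    unfold pjeInnerA
    rw [if_neg (by exact hd)]
    exact ih (fun e he => h e (List.mem_cons_of_mem _ he))

theorem pjeInnerA_hit (N n : Int) (s2 sub : List Char) (c : Char) (ds : List Char)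
    (hc : c ∈ ds) (hcond : pjeCond N n s2 c)
    (huniq : ∀ d ∈ ds, pjeCond N n s2 d → d = c) :
    pjeInnerA N n ds (s2, sub) =
      (PySem.List.slice s2 (some (PySem.Chars.find s2 [c] + 1)) none, sub ++ [c]) := by
  induction ds with
  | nil => cases hc
  | cons d ds ih =>
    unfold pjeInnerA
    by_cases hd : pjeCond N n s2 d
    · have hdc : d = c := huniq d (List.mem_cons_self) hd
      subst hdc
      rw [if_pos (by exact hd)]
    · rw [if_neg (by exact hd)]
      have hcds : c ∈ ds := by
        rcases List.mem_cons.mp hc with h | h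
        · exact absurd (h ▸ hcond) hd
        · exact h
      exact ih hcds (fun e he hce => huniq e (List.mem_cons_of_mem _ he) hce)

-- A's digit loop equals B's direct check of the determined position
theorem pje_inner_eq (N n : Int) (s2 sub : List Char) :
    pjeInnerA N n pjeDigits (s2, sub) = pjeStepB N (s2, sub) n := by
  unfold pjeStepB
  simp only
  set p : Int := (s2.length : Int) + n - N - 1 with hp
  have hcond_iff : ∀ d, pjeCond N n s2 d ↔ (PySem.Chars.find s2 [d] = p ∧ 0 < p) := by
    intro d; unfold pjeCond; omega
  by_cases hpos : 0 < p
  · have hptn : ((p.toNat : Nat) : Int) = p := by omega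
    have hget : PySem.List.pyGet? s2 p = s2[p.toNat]? := by
      conv_lhs => rw [← hptn]
      rw [PySem.List.pyGet?_natCast]
    rw [if_pos hpos, hget]
    cases hg : s2[p.toNat]? with
    | none =>
      apply pjeInnerA_no_hit
      intro d _ hd
      obtain ⟨hf, _⟩ := (hcond_iff d).mp hd
      have := ((pje_find_single_eq_iff s2 d p.toNat).mp (by rw [hptn]; exact hf)).1
      simp [hg] at this
    | some c =>
      rw [PySem.List.slice_to s2 (by omega)]
      dsimp only
      by_cases hcase : PySem.Chars.isdigit c = true ∧
          ¬ PySem.Chars.isIn [c] (List.take p.toNat s2) = true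
      · rw [if_pos hcase]
        obtain ⟨hdig, hnin⟩ := hcase
        rw [pje_isIn_single] at hnin
        have hnotbefore : ∀ i < p.toNat, s2[i]? ≠ some c := by
          intro i hi hcc
          exact hnin (List.mem_of_getElem? (l := s2.take p.toNat)
            (by rw [List.getElem?_take, if_pos hi]; exact hcc))
        have hfind : PySem.Chars.find s2 [c] = p := by
          rw [← hptn]
          exact (pje_find_single_eq_iff s2 c p.toNat).mpr ⟨hg, hnotbefore⟩
        have hcondc : pjeCond N n s2 c := (hcond_iff c).mpr ⟨hfind, hpos⟩
        have huniq : ∀ d ∈ pjeDigits, pjeCond N n s2 d → d = c := by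
          intro d _ hd
          obtain ⟨hf, _⟩ := (hcond_iff d).mp hd
          have := ((pje_find_single_eq_iff s2 d p.toNat).mp (by rw [hptn]; exact hf)).1
          rw [hg] at this
          exact (Option.some.injEq _ _ ▸ this).symm
        rw [pjeInnerA_hit N n s2 sub c pjeDigits
              ((pje_mem_digits c).mpr hdig) hcondc huniq, hfind]
      · rw [if_neg hcase]
        apply pjeInnerA_no_hit
        intro d hdmem hd
        obtain ⟨hf, _⟩ := (hcond_iff d).mp hd
        have hchar := (pje_find_single_eq_iff s2 d p.toNat).mp (by rw [hptn]; exact hf)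
        have hdc : d = c := by
          have := hchar.1; rw [hg] at this; exact (Option.some.injEq _ _ ▸ this).symm
        subst hdc
        apply hcase
        refine ⟨(pje_mem_digits d).mp hdmem, ?_⟩
        rw [pje_isIn_single]
        intro hmem
        obtain ⟨i, hi, hgi⟩ := List.getElem_of_mem hmem
        have hilt : i < p.toNat := by
          have := hi; simp [List.length_take] at this; omega
        exact hchar.2 i hilt (by
          have : (s2.take p.toNat)[i]? = some d := by
            rw [List.getElem?_eq_getElem hi, hgi]
          rwa [List.getElem?_take, if_pos hilt] at this)
  · rw [if_neg hpos]
    apply pjeInnerA_no_hit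
    intro d _ hd
    exact hpos ((hcond_iff d).mp hd).2

-- ===== VERDICT (by name: the statement is the Claim_ definition above) =====
theorem parse_joltstring_extended_spec : Claim_equal_parse_joltstring_extended := by
  intro s N _
  unfold Spec_parse_joltstring_extended parse_joltstring_extended parse_joltstring_extended_alt
  have h : (fun (st : List Char × List Char) n => pjeInnerA N n pjeDigits st) = pjeStepB N := by
    funext st n; obtain ⟨s2, sub⟩ := st; exact pje_inner_eq N n s2 sub
  rw [h]
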